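-- pv_equiv track=rewrite | github.com/Prasanna-KS-85/incident-analysis-system | utils/route_engine.py | get_facility_type
-- ===== SOURCE A (Python) =====
-- def get_facility_type(category, grievance_text=""):
--     """Maps the grievance to a Google Places Type and a specific search keyword."""
--     cat = str(category).lower()
--     text = str(grievance_text).lower()
--
--     # 1. Medical Emergencies
--     if "medical" in cat or "health" in cat or any(w in text for w in ["medical", "injury", "ambulance", "accident", "heart"]):
--         return {"type": "hospital"}
--
--     # 2. Fire Emergencies
--     if "fire" in cat or any(w in text for w in ["fire", "smoke", "burn", "aag"]):
--         return {"type": "fire_station"}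
--
--     # 3. Police / Law Enforcement
--     if "crime" in cat or "safety" in cat or "security" in cat or any(w in text for w in ["police", "theft", "assault", "fight", "snatching"]):
--         return {"type": "police"}
--
--     # 4. Civic Issues - Electricity
--     if any(w in text for w in ["light", "electricity", "power", "transformer", "wire"]):
--         return {"type": "local_government_office", "keyword": "Electricity Board TNEB BESCOM"}
--
--     # 5. Civic Issues - Water & Flooding
--     if any(w in text for w in ["water", "flood", "pipe", "drain", "clogging"]):
--         return {"type": "local_government_office", "keyword": "Water Board CMWSSB"}
--
--     # 6. Civic Issues - Roads & Sanitation
--     if any(w in text for w in ["road", "pothole", "garbage", "trash"]):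
--         return {"type": "local_government_office", "keyword": "Municipal Corporation"}
--
--     # 7. Animal Rescue
--     if any(w in text for w in ["animal", "deer", "dog", "cow"]):
--         return {"type": "veterinary_care", "keyword": "Animal Rescue Blue Cross"}
--
--     # Default Fallback for anything else
--     return {"type": "local_government_office", "keyword": "Municipal Corporation"}
-- ===== SOURCE B (Python) =====
-- # Flatten the rule cascade into one keyword -> priority table; a single full pass
-- # computes the minimum matching priority (no early return), then indexes RESULTS.
-- KEYWORDS = [
--     ("c", "medical", 0), ("c", "health", 0),
--     ("t", "medical", 0), ("t", "injury", 0), ("t", "ambulance", 0), ("t", "accident", 0), ("t", "heart", 0),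
--     ("c", "fire", 1),
--     ("t", "fire", 1), ("t", "smoke", 1), ("t", "burn", 1), ("t", "aag", 1),
--     ("c", "crime", 2), ("c", "safety", 2), ("c", "security", 2),
--     ("t", "police", 2), ("t", "theft", 2), ("t", "assault", 2), ("t", "fight", 2), ("t", "snatching", 2),
--     ("t", "light", 3), ("t", "electricity", 3), ("t", "power", 3), ("t", "transformer", 3), ("t", "wire", 3),
--     ("t", "water", 4), ("t", "flood", 4), ("t", "pipe", 4), ("t", "drain", 4), ("t", "clogging", 4),
--     ("t", "road", 5), ("t", "pothole", 5), ("t", "garbage", 5), ("t", "trash", 5),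
--     ("t", "animal", 6), ("t", "deer", 6), ("t", "dog", 6), ("t", "cow", 6),
-- ]
--
-- RESULTS = [
--     {"type": "hospital"},
--     {"type": "fire_station"},
--     {"type": "police"},
--     {"type": "local_government_office", "keyword": "Electricity Board TNEB BESCOM"},
--     {"type": "local_government_office", "keyword": "Water Board CMWSSB"},
--     {"type": "local_government_office", "keyword": "Municipal Corporation"},
--     {"type": "veterinary_care", "keyword": "Animal Rescue Blue Cross"},
--     {"type": "local_government_office", "keyword": "Municipal Corporation"},
-- ]
--
--
-- def get_facility_type(category, grievance_text=""):
--     cat = str(category).lower()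
--     text = str(grievance_text).lower()
--     best = len(RESULTS) - 1
--     for src, kw, idx in KEYWORDS:
--         if idx < best and kw in (cat if src == "c" else text):
--             best = idx
--     return dict(RESULTS[best])
-- ===== Notes on version B (the rewrite author's own statement) =====
-- stated objective: alternative
-- what changed: Replaced A's ordered chain of seven if-returns with a flat keyword->rule-priority table scanned in one full pass (no early return) that keeps the minimum matching priority, then indexes a results table with it.
import Mathlib
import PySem

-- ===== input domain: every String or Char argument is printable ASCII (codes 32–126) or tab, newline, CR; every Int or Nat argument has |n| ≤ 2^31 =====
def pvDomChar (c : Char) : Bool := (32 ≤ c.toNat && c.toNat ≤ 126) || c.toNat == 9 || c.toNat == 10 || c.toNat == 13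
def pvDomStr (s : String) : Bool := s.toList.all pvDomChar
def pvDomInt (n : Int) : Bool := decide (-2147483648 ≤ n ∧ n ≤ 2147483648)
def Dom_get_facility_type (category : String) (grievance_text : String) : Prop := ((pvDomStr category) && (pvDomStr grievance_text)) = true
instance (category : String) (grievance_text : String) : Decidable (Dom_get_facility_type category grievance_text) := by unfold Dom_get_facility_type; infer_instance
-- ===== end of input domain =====

-- B flattens A's if-return cascade into a keyword->priority table: one full pass computes
-- the minimum matching priority (no early return), then indexes a results table (alternative, same cost).


-- ===== PORT A =====
-- literal transliteration of A: lowercase, then the chain of if-returns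
def get_facility_type (category : String) (grievance_text : String) : List (String × String) :=
  let cat := PySem.Str.lower category
  let text := PySem.Str.lower grievance_text
  if PySem.Str.isIn "medical" cat || PySem.Str.isIn "health" cat ||
      (["medical", "injury", "ambulance", "accident", "heart"].any (fun w => PySem.Str.isIn w text)) then
    [("type", "hospital")]
  else if PySem.Str.isIn "fire" cat ||
      (["fire", "smoke", "burn", "aag"].any (fun w => PySem.Str.isIn w text)) then
    [("type", "fire_station")]
  else if PySem.Str.isIn "crime" cat || PySem.Str.isIn "safety" cat || PySem.Str.isIn "security" cat ||
      (["police", "theft", "assault", "fight", "snatching"].any (fun w => PySem.Str.isIn w text)) then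
    [("type", "police")]
  else if ["light", "electricity", "power", "transformer", "wire"].any (fun w => PySem.Str.isIn w text) then
    [("type", "local_government_office"), ("keyword", "Electricity Board TNEB BESCOM")]
  else if ["water", "flood", "pipe", "drain", "clogging"].any (fun w => PySem.Str.isIn w text) then
    [("type", "local_government_office"), ("keyword", "Water Board CMWSSB")]
  else if ["road", "pothole", "garbage", "trash"].any (fun w => PySem.Str.isIn w text) then
    [("type", "local_government_office"), ("keyword", "Municipal Corporation")]
  else if ["animal", "deer", "dog", "cow"].any (fun w => PySem.Str.isIn w text) then
    [("type", "veterinary_care"), ("keyword", "Animal Rescue Blue Cross")]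
  else
    [("type", "local_government_office"), ("keyword", "Municipal Corporation")]

-- ===== PORT B =====
-- B (from Source B): flat keyword -> priority table ((inCategory?, keyword, ruleIndex))
def pvKeywords : List (Bool × String × Nat) :=
  [ (true, "medical", 0),
    (true, "health", 0),
    (false, "medical", 0),
    (false, "injury", 0),
    (false, "ambulance", 0),
    (false, "accident", 0),
    (false, "heart", 0),
    (true, "fire", 1),
    (false, "fire", 1),
    (false, "smoke", 1),
    (false, "burn", 1),
    (false, "aag", 1),
    (true, "crime", 2),
    (true, "safety", 2),
    (true, "security", 2),
    (false, "police", 2),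
    (false, "theft", 2),
    (false, "assault", 2),
    (false, "fight", 2),
    (false, "snatching", 2),
    (false, "light", 3),
    (false, "electricity", 3),
    (false, "power", 3),
    (false, "transformer", 3),
    (false, "wire", 3),
    (false, "water", 4),
    (false, "flood", 4),
    (false, "pipe", 4),
    (false, "drain", 4),
    (false, "clogging", 4),
    (false, "road", 5),
    (false, "pothole", 5),
    (false, "garbage", 5),
    (false, "trash", 5),
    (false, "animal", 6),
    (false, "deer", 6),
    (false, "dog", 6),
    (false, "cow", 6) ]

-- B's results table; index 7 is the default fallback
def pvResults : List (List (String × String)) :=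
  [ [("type", "hospital")],
    [("type", "fire_station")],
    [("type", "police")],
    [("type", "local_government_office"), ("keyword", "Electricity Board TNEB BESCOM")],
    [("type", "local_government_office"), ("keyword", "Water Board CMWSSB")],
    [("type", "local_government_office"), ("keyword", "Municipal Corporation")],
    [("type", "veterinary_care"), ("keyword", "Animal Rescue Blue Cross")],
    [("type", "local_government_office"), ("keyword", "Municipal Corporation")] ]

-- one full pass over all keywords keeping the minimum matching rule index, then index RESULTS
-- (B's index is always < pvResults.length, so getD's default is never used)
def get_facility_type_alt (category : String) (grievance_text : String) : List (String × String) :=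
  let cat := PySem.Str.lower category
  let text := PySem.Str.lower grievance_text
  let best := pvKeywords.foldl
    (fun best e =>
      if decide (e.2.2 < best) && PySem.Str.isIn e.2.1 (if e.1 then cat else text) then e.2.2 else best)
    (pvResults.length - 1)
  pvResults.getD best []

-- ===== PRECONDITION & SPEC =====
def Spec_get_facility_type (category : String) (grievance_text : String) (out : List (String × String)) : Prop := out = get_facility_type_alt category grievance_text
instance (category : String) (grievance_text : String) (out : List (String × String)) : Decidable (Spec_get_facility_type category grievance_text out) := by unfold Spec_get_facility_type; infer_instance

-- ===== CLAIM (what is proved, stated in full; the proofs are below) =====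
def Claim_equal_get_facility_type : Prop := ∀ (category : String) (grievance_text : String), Dom_get_facility_type category grievance_text → Spec_get_facility_type category grievance_text (get_facility_type category grievance_text)

-- ===== LEMMAS AND PROOFS =====

-- ===== VERDICT (by name: the statement is the Claim_ definition above) =====
set_option maxHeartbeats 4000000 in
theorem get_facility_type_spec : Claim_equal_get_facility_type := by
  intro category grievance_text _
  unfold Spec_get_facility_type
  by_cases h1 : PySem.Str.isIn "medical" (PySem.Str.lower category) = true
  · simp_all [get_facility_type, get_facility_type_alt, pvKeywords, pvResults]
  by_cases h2 : PySem.Str.isIn "health" (PySem.Str.lower category) = true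
  · simp_all [get_facility_type, get_facility_type_alt, pvKeywords, pvResults]
  by_cases h3 : PySem.Str.isIn "medical" (PySem.Str.lower grievance_text) = true
  · simp_all [get_facility_type, get_facility_type_alt, pvKeywords, pvResults]
  by_cases h4 : PySem.Str.isIn "injury" (PySem.Str.lower grievance_text) = true
  · simp_all [get_facility_type, get_facility_type_alt, pvKeywords, pvResults]
  by_cases h5 : PySem.Str.isIn "ambulance" (PySem.Str.lower grievance_text) = true
  · simp_all [get_facility_type, get_facility_type_alt, pvKeywords, pvResults]
  by_cases h6 : PySem.Str.isIn "accident" (PySem.Str.lower grievance_text) = true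
  · simp_all [get_facility_type, get_facility_type_alt, pvKeywords, pvResults]
  by_cases h7 : PySem.Str.isIn "heart" (PySem.Str.lower grievance_text) = true
  · simp_all [get_facility_type, get_facility_type_alt, pvKeywords, pvResults]
  by_cases h8 : PySem.Str.isIn "fire" (PySem.Str.lower category) = true
  · simp_all [get_facility_type, get_facility_type_alt, pvKeywords, pvResults]
  by_cases h9 : PySem.Str.isIn "fire" (PySem.Str.lower grievance_text) = true
  · simp_all [get_facility_type, get_facility_type_alt, pvKeywords, pvResults]
  by_cases h10 : PySem.Str.isIn "smoke" (PySem.Str.lower grievance_text) = true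
  · simp_all [get_facility_type, get_facility_type_alt, pvKeywords, pvResults]
  by_cases h11 : PySem.Str.isIn "burn" (PySem.Str.lower grievance_text) = true
  · simp_all [get_facility_type, get_facility_type_alt, pvKeywords, pvResults]
  by_cases h12 : PySem.Str.isIn "aag" (PySem.Str.lower grievance_text) = true
  · simp_all [get_facility_type, get_facility_type_alt, pvKeywords, pvResults]
  by_cases h13 : PySem.Str.isIn "crime" (PySem.Str.lower category) = true
  · simp_all [get_facility_type, get_facility_type_alt, pvKeywords, pvResults]
  by_cases h14 : PySem.Str.isIn "safety" (PySem.Str.lower category) = true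
  · simp_all [get_facility_type, get_facility_type_alt, pvKeywords, pvResults]
  by_cases h15 : PySem.Str.isIn "security" (PySem.Str.lower category) = true
  · simp_all [get_facility_type, get_facility_type_alt, pvKeywords, pvResults]
  by_cases h16 : PySem.Str.isIn "police" (PySem.Str.lower grievance_text) = true
  · simp_all [get_facility_type, get_facility_type_alt, pvKeywords, pvResults]
  by_cases h17 : PySem.Str.isIn "theft" (PySem.Str.lower grievance_text) = true
  · simp_all [get_facility_type, get_facility_type_alt, pvKeywords, pvResults]
  by_cases h18 : PySem.Str.isIn "assault" (PySem.Str.lower grievance_text) = true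
  · simp_all [get_facility_type, get_facility_type_alt, pvKeywords, pvResults]
  by_cases h19 : PySem.Str.isIn "fight" (PySem.Str.lower grievance_text) = true
  · simp_all [get_facility_type, get_facility_type_alt, pvKeywords, pvResults]
  by_cases h20 : PySem.Str.isIn "snatching" (PySem.Str.lower grievance_text) = true
  · simp_all [get_facility_type, get_facility_type_alt, pvKeywords, pvResults]
  by_cases h21 : PySem.Str.isIn "light" (PySem.Str.lower grievance_text) = true
  · simp_all [get_facility_type, get_facility_type_alt, pvKeywords, pvResults]
  by_cases h22 : PySem.Str.isIn "electricity" (PySem.Str.lower grievance_text) = true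
  · simp_all [get_facility_type, get_facility_type_alt, pvKeywords, pvResults]
  by_cases h23 : PySem.Str.isIn "power" (PySem.Str.lower grievance_text) = true
  · simp_all [get_facility_type, get_facility_type_alt, pvKeywords, pvResults]
  by_cases h24 : PySem.Str.isIn "transformer" (PySem.Str.lower grievance_text) = true
  · simp_all [get_facility_type, get_facility_type_alt, pvKeywords, pvResults]
  by_cases h25 : PySem.Str.isIn "wire" (PySem.Str.lower grievance_text) = true
  · simp_all [get_facility_type, get_facility_type_alt, pvKeywords, pvResults]
  by_cases h26 : PySem.Str.isIn "water" (PySem.Str.lower grievance_text) = true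
  · simp_all [get_facility_type, get_facility_type_alt, pvKeywords, pvResults]
  by_cases h27 : PySem.Str.isIn "flood" (PySem.Str.lower grievance_text) = true
  · simp_all [get_facility_type, get_facility_type_alt, pvKeywords, pvResults]
  by_cases h28 : PySem.Str.isIn "pipe" (PySem.Str.lower grievance_text) = true
  · simp_all [get_facility_type, get_facility_type_alt, pvKeywords, pvResults]
  by_cases h29 : PySem.Str.isIn "drain" (PySem.Str.lower grievance_text) = true
  · simp_all [get_facility_type, get_facility_type_alt, pvKeywords, pvResults]
  by_cases h30 : PySem.Str.isIn "clogging" (PySem.Str.lower grievance_text) = true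
  · simp_all [get_facility_type, get_facility_type_alt, pvKeywords, pvResults]
  by_cases h31 : PySem.Str.isIn "road" (PySem.Str.lower grievance_text) = true
  · simp_all [get_facility_type, get_facility_type_alt, pvKeywords, pvResults]
  by_cases h32 : PySem.Str.isIn "pothole" (PySem.Str.lower grievance_text) = true
  · simp_all [get_facility_type, get_facility_type_alt, pvKeywords, pvResults]
  by_cases h33 : PySem.Str.isIn "garbage" (PySem.Str.lower grievance_text) = true
  · simp_all [get_facility_type, get_facility_type_alt, pvKeywords, pvResults]
  by_cases h34 : PySem.Str.isIn "trash" (PySem.Str.lower grievance_text) = true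
  · simp_all [get_facility_type, get_facility_type_alt, pvKeywords, pvResults]
  by_cases h35 : PySem.Str.isIn "animal" (PySem.Str.lower grievance_text) = true
  · simp_all [get_facility_type, get_facility_type_alt, pvKeywords, pvResults]
  by_cases h36 : PySem.Str.isIn "deer" (PySem.Str.lower grievance_text) = true
  · simp_all [get_facility_type, get_facility_type_alt, pvKeywords, pvResults]
  by_cases h37 : PySem.Str.isIn "dog" (PySem.Str.lower grievance_text) = true
  · simp_all [get_facility_type, get_facility_type_alt, pvKeywords, pvResults]
  by_cases h38 : PySem.Str.isIn "cow" (PySem.Str.lower grievance_text) = true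
  · simp_all [get_facility_type, get_facility_type_alt, pvKeywords, pvResults]
  simp_all [get_facility_type, get_facility_type_alt, pvKeywords, pvResults]
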